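-- pv_equiv track=rewrite | github.com/CochiorDaniel/Python-Programing | Lab2/ex7.py | pal_nums
-- ===== SOURCE A (Python) =====
-- def pal_nums(numbers):
--     palindroame = []
--     for num in numbers:
--         ogl = 0
--         cpnum = num
--         while cpnum:
--             ogl = 10 * ogl + cpnum % 10
--             cpnum = cpnum // 10
--         if num == ogl:
--             palindroame.append(num)
--
--     n = len(palindroame)
--     max_pal = max(palindroame)
--
--     return (n, max_pal)
-- ===== SOURCE B (Python) =====
-- def pal_nums(numbers):
--     pals = [num for num in numbers if str(num) == str(num)[::-1]]
--     return (len(pals), max(pals))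
-- ===== Notes on version B (the rewrite author's own statement) =====
-- stated objective: idiomatic
-- what changed: The arithmetic digit-reversal while-loop is replaced by a string-representation palindrome test (str(num) == str(num)[::-1]) inside a list comprehension; the (count, max) result is computed from the filtered list as before.
import Mathlib
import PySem

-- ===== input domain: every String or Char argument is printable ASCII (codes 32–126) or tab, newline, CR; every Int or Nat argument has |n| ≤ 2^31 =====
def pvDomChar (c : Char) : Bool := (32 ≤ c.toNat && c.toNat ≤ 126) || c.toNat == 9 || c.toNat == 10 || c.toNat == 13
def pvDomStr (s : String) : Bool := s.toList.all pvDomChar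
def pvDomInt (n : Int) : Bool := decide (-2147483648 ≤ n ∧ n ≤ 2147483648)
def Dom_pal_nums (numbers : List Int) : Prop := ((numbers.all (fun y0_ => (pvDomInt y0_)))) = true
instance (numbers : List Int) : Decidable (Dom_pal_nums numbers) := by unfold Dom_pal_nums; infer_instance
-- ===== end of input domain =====

-- B replaces A's arithmetic digit-reversal while-loop by the idiomatic string palindrome test
-- str(num) == str(num)[::-1] inside a list comprehension; same (count, max) result.

-- ===== PORT A =====
-- the 'while cpnum:' loop; the guard '0 < cpnum' makes it total and agrees with Python's
-- 'cpnum != 0' for cpnum ≥ 0 (Pre_); on negative cpnum Python loops forever (excluded by Pre_).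
def pvRev (cpnum ogl : Int) : Int :=
  if h : 0 < cpnum then
    pvRev (PySem.Int.floordiv cpnum 10) (10 * ogl + PySem.Int.mod cpnum 10)
  else ogl
termination_by cpnum.toNat
decreasing_by
  have h10 : PySem.Int.floordiv cpnum 10 = cpnum / 10 :=
    PySem.Int.floordiv_eq_ediv_of_pos (by norm_num)
  rw [h10]; omega

def pal_nums (numbers : List Int) : Int × Int :=
  let palindroame : List Int := numbers.foldl (fun acc num =>
    let ogl := pvRev num 0
    if num == ogl then acc ++ [num] else acc) []
  let n : Int := palindroame.length
  -- max(palindroame): raises ValueError on the empty list — excluded by Pre_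
  match PySem.List.max? palindroame (fun x => x) with
  | some max_pal => (n, max_pal)
  | none => (n, 0)  -- unreachable under Pre_

-- ===== PORT B =====
def pal_nums_alt (numbers : List Int) : Int × Int :=
  -- pals = [num for num in numbers if str(num) == str(num)[::-1]]
  let pals : List Int := numbers.filter (fun num =>
    PySem.Int.toChars num == (PySem.Int.toChars num).reverse)
  -- max(pals): raises ValueError on the empty list — excluded by Pre_
  match PySem.List.max? pals (fun x => x) with
  | some m => ((pals.length : Int), m)
  | none => ((pals.length : Int), 0)  -- unreachable under Pre_

-- ===== PRECONDITION & SPEC =====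
-- Pre_ excludes (i) lists containing a negative number, on which A's while-loop never
-- terminates (-1 // 10 == -1), and (ii) lists with no palindromic member, on which
-- Python's max raises ValueError (empty sequence).
def Pre_pal_nums (numbers : List Int) : Prop :=
  (∀ n ∈ numbers, 0 ≤ n) ∧
  ∃ n ∈ numbers, (PySem.Int.toChars n).reverse = PySem.Int.toChars n

instance (numbers : List Int) : Decidable (Pre_pal_nums numbers) := by
  unfold Pre_pal_nums; infer_instance

def pvWitness_pal_nums : List Int := [12, 7, 131]

def Spec_pal_nums (numbers : List Int) (out : Int × Int) : Prop := out = pal_nums_alt numbers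
instance (numbers : List Int) (out : Int × Int) : Decidable (Spec_pal_nums numbers out) := by
  unfold Spec_pal_nums; infer_instance

-- ===== CLAIM (what is proved, stated in full; the proofs are below) =====
def Claim_equal_pal_nums : Prop := ∀ (numbers : List Int), Dom_pal_nums numbers → Pre_pal_nums numbers → Spec_pal_nums numbers (pal_nums numbers)

-- ===== LEMMAS AND PROOFS =====

-- A's reversal loop computes the value of the reversed decimal digit string.
theorem pvRev_nat (n : Nat) : ∀ a : Nat, pvRev (n : Int) (a : Int) =
    ((a * 10 ^ (Nat.digits 10 n).length + Nat.ofDigits 10 (Nat.digits 10 n).reverse : Nat) : Int) := by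
  induction n using Nat.strong_induction_on with
  | _ n ih =>
    intro a
    rcases Nat.eq_zero_or_pos n with h0 | hpos
    · subst h0
      rw [pvRev]
      simp
    · rw [pvRev]
      have hc : (0 : Int) < (n : Int) := by exact_mod_cast hpos
      rw [dif_pos hc]
      have hd : PySem.Int.floordiv (n : Int) 10 = ((n / 10 : Nat) : Int) := by
        exact_mod_cast PySem.Int.floordiv_natCast n 10
      have hm : PySem.Int.mod (n : Int) 10 = ((n % 10 : Nat) : Int) := by
        exact_mod_cast PySem.Int.mod_natCast n 10
      rw [hd, hm]
      have hcast : (10 : Int) * (a : Int) + ((n % 10 : Nat) : Int) = ((10 * a + n % 10 : Nat) : Int) := by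
        push_cast; ring
      rw [hcast, ih (n / 10) (Nat.div_lt_self hpos (by norm_num)) (10 * a + n % 10)]
      have hdig : Nat.digits 10 n = n % 10 :: Nat.digits 10 (n / 10) :=
        Nat.digits_def' (by norm_num) hpos
      rw [hdig]
      simp only [List.reverse_cons, List.length_cons, Nat.ofDigits_append]
      rw [List.length_reverse]
      simp only [Nat.ofDigits_cons, Nat.ofDigits_nil]
      push_cast
      ring

-- the arithmetic palindrome test characterised on the digit list
theorem ofDigits_reverse_eq_iff (n : Nat) :
    (Nat.ofDigits 10 (Nat.digits 10 n).reverse = n) ↔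
    (Nat.digits 10 n).reverse = Nat.digits 10 n := by
  constructor
  · intro h
    rcases Nat.eq_zero_or_pos n with h0 | hpos
    · simp [h0]
    have hne : Nat.digits 10 n ≠ [] := Nat.digits_ne_nil_iff_ne_zero.mpr (Nat.pos_iff_ne_zero.mp hpos)
    have hdig : Nat.digits 10 n = n % 10 :: Nat.digits 10 (n / 10) :=
      Nat.digits_def' (by norm_num) hpos
    by_cases h10 : n % 10 = 0
    · -- head digit 0: the reversed digit value is too small to equal n — contradiction with h
      exfalso
      have hrev : (Nat.digits 10 n).reverse = (Nat.digits 10 (n / 10)).reverse ++ [0] := by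
        rw [hdig, h10, List.reverse_cons]
      have hlt : Nat.ofDigits 10 (Nat.digits 10 n).reverse <
          10 ^ (Nat.digits 10 (n / 10)).length := by
        rw [hrev, Nat.ofDigits_append]
        have : Nat.ofDigits 10 ((Nat.digits 10 (n / 10)).reverse) <
            10 ^ ((Nat.digits 10 (n / 10)).reverse).length :=
          Nat.ofDigits_lt_base_pow_length (by norm_num)
            (fun x hx => Nat.digits_lt_base (by norm_num) (List.mem_reverse.mp hx))
        simpa [Nat.ofDigits] using this
      have hlen : (Nat.digits 10 n).length = (Nat.digits 10 (n / 10)).length + 1 := by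
        rw [hdig]; rfl
      have hge : ¬ (n < 10 ^ (Nat.digits 10 (n / 10)).length) := by
        intro hcontra
        have := (Nat.digits_length_le_iff (b := 10) (by norm_num) n).mpr hcontra
        omega
      omega
    · -- head digit nonzero: the reversed list is a valid digit expansion of n
      have hlast : ∀ (hr : (Nat.digits 10 n).reverse ≠ []),
          ((Nat.digits 10 n).reverse).getLast hr ≠ 0 := by
        intro hr
        simp only [List.getLast_reverse]
        simp [hdig, h10]
      have := Nat.digits_ofDigits 10 (by norm_num) (Nat.digits 10 n).reverse
        (fun d hd => Nat.digits_lt_base (by norm_num) (List.mem_reverse.mp hd)) hlast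
      rw [h] at this
      exact this.symm
  · intro h
    rw [h, Nat.ofDigits_digits]

-- str(n) for n > 0 is the reversed digit list rendered through Nat.digitChar
theorem toDigitsCore_eq (fuel : Nat) : ∀ (n : Nat) (ds : List Char), n ≤ fuel → 0 < n →
    Nat.toDigitsCore 10 fuel n ds = ((Nat.digits 10 n).map Nat.digitChar).reverse ++ ds := by
  induction fuel with
  | zero => intro n ds hf hn; omega
  | succ fuel ih =>
    intro n ds hf hn
    have hdig : Nat.digits 10 n = n % 10 :: Nat.digits 10 (n / 10) :=
      Nat.digits_def' (by norm_num) hn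
    rw [Nat.toDigitsCore]
    by_cases hz : n / 10 = 0
    · simp only [hz]
      rw [hdig, hz]
      simp
    · rw [if_neg hz]
      rw [ih (n / 10) (Nat.digitChar (n % 10) :: ds)
        (by have := Nat.div_lt_self hn (by norm_num : 1 < 10); omega)
        (Nat.pos_of_ne_zero hz)]
      rw [hdig]
      simp

theorem toChars_nat (n : Nat) (hn : 0 < n) :
    PySem.Int.toChars (n : Int) = ((Nat.digits 10 n).map Nat.digitChar).reverse := by
  have : ¬ ((n : Int) < 0) := by omega
  simp only [PySem.Int.toChars, if_neg this, Int.toNat_natCast, Nat.toDigits]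
  simpa using toDigitsCore_eq (n + 1) n [] (by omega) hn

theorem digitChar_inj : ∀ a < 10, ∀ b < 10, Nat.digitChar a = Nat.digitChar b → a = b := by
  decide

theorem map_digitChar_inj : ∀ (l1 l2 : List Nat), (∀ d ∈ l1, d < 10) → (∀ d ∈ l2, d < 10) →
    l1.map Nat.digitChar = l2.map Nat.digitChar → l1 = l2 := by
  intro l1
  induction l1 with
  | nil => intro l2 _ _ h; cases l2 <;> simp_all
  | cons a t ih =>
    intro l2 h1 h2 h
    cases l2 with
    | nil => simp_all
    | cons b t2 =>
      simp only [List.map_cons, List.cons.injEq] at h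
      have ha := digitChar_inj a (h1 a (by simp)) b (h2 b (by simp)) h.1
      have ht := ih t2 (fun d hd => h1 d (by simp [hd])) (fun d hd => h2 d (by simp [hd])) h.2
      rw [ha, ht]

-- the two Boolean palindrome tests agree on every non-negative integer
theorem check_eq (num : Int) (hnum : 0 ≤ num) :
    (num == pvRev num 0) = (PySem.Int.toChars num == (PySem.Int.toChars num).reverse) := by
  obtain ⟨n, rfl⟩ : ∃ n : Nat, num = (n : Int) := ⟨num.toNat, (Int.toNat_of_nonneg hnum).symm⟩
  rcases Nat.eq_zero_or_pos n with h0 | hpos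
  · subst h0
    have h1 : pvRev ((0 : Nat) : Int) 0 = 0 := by rw [pvRev]; norm_num
    rw [h1]; decide
  have hrev : pvRev (n : Int) 0 = ((Nat.ofDigits 10 (Nat.digits 10 n).reverse : Nat) : Int) := by
    simpa using pvRev_nat n 0
  have hL : ((n : Int) == pvRev (n : Int) 0) =
      decide ((Nat.digits 10 n).reverse = Nat.digits 10 n) := by
    rw [hrev, Bool.eq_iff_iff]
    simp only [beq_iff_eq, decide_eq_true_eq, Nat.cast_inj]
    constructor
    · intro hh; exact (ofDigits_reverse_eq_iff n).mp hh.symm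
    · intro hh; exact ((ofDigits_reverse_eq_iff n).mpr hh).symm
  have htc := toChars_nat n hpos
  have hR : (PySem.Int.toChars (n : Int) == (PySem.Int.toChars (n : Int)).reverse) =
      decide ((Nat.digits 10 n).reverse = Nat.digits 10 n) := by
    rw [htc, Bool.eq_iff_iff]
    simp only [beq_iff_eq, decide_eq_true_eq, List.reverse_reverse, ← List.map_reverse]
    constructor
    · intro hh
      exact map_digitChar_inj _ _
        (fun d hd => Nat.digits_lt_base (by norm_num) (List.mem_reverse.mp hd))
        (fun d hd => Nat.digits_lt_base (by norm_num) hd) hh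
    · intro hh; rw [hh]
  rw [hL, hR]

-- ===== VERDICT (by name: the statement is the Claim_ definition above) =====
theorem pal_nums_spec : Claim_equal_pal_nums := by
  intro numbers _hdom hpre
  unfold Spec_pal_nums pal_nums pal_nums_alt
  have hlist : numbers.foldl (fun acc num =>
      let ogl := pvRev num 0
      if num == ogl then acc ++ [num] else acc) [] =
      numbers.filter (fun num => PySem.Int.toChars num == (PySem.Int.toChars num).reverse) := by
    rw [PySem.List.foldl_append_if (fun num => num == pvRev num 0) (fun x => x) numbers []]
    simp only [List.nil_append, List.map_id']
    exact List.filter_congr (fun x hx => check_eq x (hpre.1 x hx))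
  rw [hlist]
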